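-- pv_equiv track=rewrite | github.com/ChrisChan13/Genshin-Impact-Lyre | libs/lyre.py | getNote
-- ===== SOURCE A (Python) =====
-- notes = [
--   48, 50, 52, 53, 55, 57, 59, # C4~B4
--   60, 62, 64, 65, 67, 69, 71, # C5~B5 (中央)
--   72, 74, 76, 77, 79, 81, 83, # C6~B6
-- ]
--
-- def getNote(note):
--   noteList = []
--   # 低于最低八度，升高至最低八度
--   while note < notes[0]:
--     note += 12
--   # 高于最高八度，降低至最高八度
--   while note > notes[-1]:
--     note -= 12
--
--   # TODO: 半音兼容
--   # C4~B4 黑键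
--   # if notes[0] <= note <= notes[6] and note not in notes:
--   # C5~B5 黑键
--   # if notes[7] <= note <= notes[13] and note not in notes:
--   # C6~B6 黑键
--   # if notes[14] <= note <= notes[20] and note not in notes:
--
--   if note in notes:
--     noteList.append(note)
--   return noteList
-- ===== SOURCE B (Python) =====
-- NOTE_MIN, NOTE_MAX = 48, 83
-- _SCALE = {0, 2, 4, 5, 7, 9, 11}  # major-scale offsets from C
--
-- def getNote(note):
--   if note < NOTE_MIN:
--     note = NOTE_MIN + (note - NOTE_MIN) % 12
--   elif note > NOTE_MAX:
--     note = NOTE_MAX - (NOTE_MAX - note) % 12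
--   return [note] if (note - NOTE_MIN) % 12 in _SCALE else []
-- ===== Notes on version B (the rewrite author's own statement) =====
-- stated objective: simpler
-- what changed: Replaces both octave-shifting while-loops with a closed-form floor-modulo clamp into [48,83] and replaces the list-membership scan with a mod-12 scale-offset test.
import Mathlib
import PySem

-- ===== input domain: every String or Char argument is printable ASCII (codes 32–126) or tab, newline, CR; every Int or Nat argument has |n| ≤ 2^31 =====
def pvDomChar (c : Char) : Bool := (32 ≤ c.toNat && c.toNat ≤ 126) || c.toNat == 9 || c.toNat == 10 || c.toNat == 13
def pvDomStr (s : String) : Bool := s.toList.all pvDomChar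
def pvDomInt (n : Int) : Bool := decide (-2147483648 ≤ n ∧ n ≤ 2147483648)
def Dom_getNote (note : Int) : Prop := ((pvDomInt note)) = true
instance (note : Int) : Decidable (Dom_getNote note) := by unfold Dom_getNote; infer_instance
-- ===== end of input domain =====

-- B replaces the two octave-shifting while-loops with a closed-form floor-modulo clamp
-- into [48,83] and the list-membership scan with a mod-12 scale-offset test (simpler).


-- ===== PORT A =====
-- the module-level constant `notes`
def pvNotes : List Int :=
  [48, 50, 52, 53, 55, 57, 59,
   60, 62, 64, 65, 67, 69, 71,
   72, 74, 76, 77, 79, 81, 83]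

-- `while note < notes[0]: note += 12`
def pvRaiseLoop (note : Int) : Int :=
  if note < 48 then pvRaiseLoop (note + 12) else note
termination_by (48 - note).toNat
decreasing_by omega

-- `while note > notes[-1]: note -= 12`
def pvLowerLoop (note : Int) : Int :=
  if note > 83 then pvLowerLoop (note - 12) else note
termination_by (note - 83).toNat
decreasing_by omega

def getNote (note : Int) : List Int :=
  let note := pvRaiseLoop note
  let note := pvLowerLoop note
  if note ∈ pvNotes then [note] else []

-- ===== PORT B =====
def pvScale : List Int := [0, 2, 4, 5, 7, 9, 11]

def getNote_alt (note : Int) : List Int :=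
  -- Python `%` with divisor 12 > 0: PySem.Int.mod _ 12 = Int.emod _ 12 (mod_eq_emod_of_pos)
  let n : Int :=
    if note < 48 then 48 + PySem.Int.mod (note - 48) 12
    else if note > 83 then 83 - PySem.Int.mod (83 - note) 12
    else note
  if PySem.Int.mod (n - 48) 12 ∈ pvScale then [n] else []

-- ===== PRECONDITION & SPEC =====
def Spec_getNote (note : Int) (out : List Int) : Prop := out = getNote_alt note
instance (note : Int) (out : List Int) : Decidable (Spec_getNote note out) := by unfold Spec_getNote; infer_instance

-- ===== CLAIM (what is proved, stated in full; the proofs are below) =====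
def Claim_equal_getNote : Prop := ∀ (note : Int), Dom_getNote note → Spec_getNote note (getNote note)

-- ===== LEMMAS AND PROOFS =====
theorem pvRaiseLoop_spec (note : Int) :
    pvRaiseLoop note = if note < 48 then 48 + (note - 48) % 12 else note := by
  induction note using pvRaiseLoop.induct with
  | case1 note h ih =>
    rw [pvRaiseLoop, if_pos h, ih]
    by_cases h2 : note + 12 < 48 <;> simp only [h2, if_pos, if_false] <;> omega
  | case2 note h => rw [pvRaiseLoop]; simp [h]

theorem pvLowerLoop_spec (note : Int) :
    pvLowerLoop note = if note > 83 then 83 - (83 - note) % 12 else note := by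
  induction note using pvLowerLoop.induct with
  | case1 note h ih =>
    rw [pvLowerLoop, if_pos h, ih]
    by_cases h2 : note - 12 > 83 <;> simp only [h2, if_pos, if_false] <;> omega
  | case2 note h => rw [pvLowerLoop]; simp [h]

-- membership in the 21-note list ↔ in-range plus scale-offset test, for the clamped value
theorem pvMem_notes (n : Int) (h48 : 48 ≤ n) (h83 : n ≤ 83) :
    (n ∈ pvNotes) ↔ (n - 48) % 12 ∈ pvScale := by
  simp only [pvNotes, pvScale, List.mem_cons, List.not_mem_nil, or_false]
  omega

-- ===== VERDICT (by name: the statement is the Claim_ definition above) =====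
theorem getNote_spec : Claim_equal_getNote := by
  intro note _
  unfold Spec_getNote getNote getNote_alt
  simp only [pvRaiseLoop_spec, pvLowerLoop_spec,
    PySem.Int.mod_eq_emod_of_pos (by norm_num : (0:Int) < 12)]
  by_cases h1 : note < 48
  · have hlt : ¬ (48 + (note - 48) % 12 > 83) := by omega
    simp only [if_pos h1, hlt, if_false]
    simp only [pvMem_notes _ (by omega : (48:Int) ≤ 48 + (note - 48) % 12) (by omega)]
  · by_cases h2 : note > 83
    · have h1' : ¬ (note < 48) := by omega
      simp only [if_neg h1', if_pos h2]
      simp only [pvMem_notes _ (by omega : (48:Int) ≤ 83 - (83 - note) % 12) (by omega)]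
    · simp only [if_neg h1, if_neg h2]
      simp only [pvMem_notes _ (by omega : (48:Int) ≤ note) (by omega)]
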